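-- pv_equiv track=rewrite | github.com/protocol7/advent-of-code | 2016/7/foo.py | ssl
-- ===== SOURCE A (Python) =====
-- def ssl(ip):
--     hyper = False
--     p1, p2 = None, None
--     found_outside = set()
--     found_inside = set()
--     for c in ip:
--         if c == "[":
--             hyper = True
--             p1, p2 = None, None
--         elif c == "]":
--             hyper = False
--             p1, p2 = None, None
--         else:
--             if c == p2 and p1 != c:
--                 if hyper:
--                     found_inside.add(p1 + c + p1)
--                 else:
--                     found_outside.add(c + p1 + c)
--             p2 = p1
--             p1 = c
--     return len(found_inside.intersection(found_outside)) > 0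
-- ===== SOURCE B (Python) =====
-- def ssl(ip):
--     # Pass 1: split into (segment, is_hypernet) chunks, toggling at brackets.
--     segments = []
--     cur = []
--     hyper = False
--     for c in ip:
--         if c == "[":
--             segments.append(("".join(cur), hyper))
--             cur = []
--             hyper = True
--         elif c == "]":
--             segments.append(("".join(cur), hyper))
--             cur = []
--             hyper = False
--         else:
--             cur.append(c)
--     segments.append(("".join(cur), hyper))
--
--     # Pass 2: slide a 3-char window over each segment.
--     babs = set()
--     abas = set()
--     for s, h in segments:
--         for a, b, c in zip(s, s[1:], s[2:]):
--             if a == c and a != b: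
--                 if h:
--                     babs.add(b + a + b)
--                 else:
--                     abas.add(a + b + a)
--     return len(babs & abas) > 0
-- ===== Notes on version B (the rewrite author's own statement) =====
-- stated objective: simpler
-- what changed: A's single state machine carrying the last two characters and a hypernet flag is replaced by a two-pass decomposition: first split the string into bracket-toggled (segment, is_hypernet) chunks, then slide a 3-char window over each segment collecting ABA/BAB sets.
import Mathlib
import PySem

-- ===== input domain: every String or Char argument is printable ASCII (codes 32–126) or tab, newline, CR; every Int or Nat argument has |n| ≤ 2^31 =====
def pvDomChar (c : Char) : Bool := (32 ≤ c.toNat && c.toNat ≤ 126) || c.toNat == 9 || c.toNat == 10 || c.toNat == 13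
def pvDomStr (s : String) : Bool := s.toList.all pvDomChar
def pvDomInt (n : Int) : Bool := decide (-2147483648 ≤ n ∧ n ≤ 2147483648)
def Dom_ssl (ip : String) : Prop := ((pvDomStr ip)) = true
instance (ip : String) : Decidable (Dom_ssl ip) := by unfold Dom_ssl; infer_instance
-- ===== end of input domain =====

-- B replaces A's streaming two-previous-chars state machine by a two-pass decomposition
-- (split into bracket-toggled segments, then a 3-char sliding window per segment); objective: simpler.

-- ===== PORT A =====
-- A's single loop: hyper flag, last two chars p1/p2 (None = Option.none), two growing sets.
def sslLoop : List Char → Bool → Option Char → Option Char →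
    PySem.Set String → PySem.Set String → PySem.Set String × PySem.Set String
  | [], _, _, _, ins, outs => (ins, outs)
  | c :: rest, hyper, p1, p2, ins, outs =>
    if c = '[' then sslLoop rest true none none ins outs
    else if c = ']' then sslLoop rest false none none ins outs
    else
      if p2 = some c ∧ p1 ≠ some c then
        match p1 with
        | some b =>
          if hyper then
            sslLoop rest hyper (some c) p1 (PySem.Set.add ins (String.mk [b, c, b])) outs
          else
            sslLoop rest hyper (some c) p1 ins (PySem.Set.add outs (String.mk [c, b, c]))
        | none => sslLoop rest hyper (some c) p1 ins outs
          -- p2 = some c forces p1 ≠ none on every state A's loop actually reaches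
      else sslLoop rest hyper (some c) p1 ins outs

def ssl (ip : String) : Bool :=
  let r := sslLoop ip.toList false none none PySem.Set.empty PySem.Set.empty
  decide (0 < PySem.Set.len (PySem.Set.inter r.1 r.2))

-- ===== PORT B =====
-- B pass 1: split into (segment, is_hypernet) chunks, toggling at brackets.
def segLoop : List Char → List Char → Bool → List (List Char × Bool) → List (List Char × Bool)
  | [], cur, hyper, segs => segs ++ [(cur, hyper)]
  | c :: rest, cur, hyper, segs =>
    if c = '[' then segLoop rest [] true (segs ++ [(cur, hyper)])
    else if c = ']' then segLoop rest [] false (segs ++ [(cur, hyper)])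
    else segLoop rest (cur ++ [c]) hyper segs

-- zip(s, s[1:], s[2:]): the list of 3-char windows of s
def win3 : List Char → List (Char × Char × Char)
  | a :: b :: c :: r => (a, b, c) :: win3 (b :: c :: r)
  | _ => []

-- B pass 2 inner body: one window into the (babs, abas) pair
def winStep (h : Bool) (st : PySem.Set String × PySem.Set String) (t : Char × Char × Char) :
    PySem.Set String × PySem.Set String :=
  if t.1 = t.2.2 ∧ t.1 ≠ t.2.1 then
    if h then (PySem.Set.add st.1 (String.mk [t.2.1, t.1, t.2.1]), st.2)
    else (st.1, PySem.Set.add st.2 (String.mk [t.1, t.2.1, t.1]))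
  else st

def ssl_alt (ip : String) : Bool :=
  let segs := segLoop ip.toList [] false []
  let r := segs.foldl (fun st sh => (win3 sh.1).foldl (winStep sh.2) st)
      (PySem.Set.empty, PySem.Set.empty)
  decide (0 < PySem.Set.len (PySem.Set.inter r.1 r.2))

-- ===== PRECONDITION & SPEC =====
def Spec_ssl (ip : String) (out : Bool) : Prop := out = ssl_alt ip
instance (ip : String) (out : Bool) : Decidable (Spec_ssl ip out) := by unfold Spec_ssl; infer_instance

-- ===== CLAIM (what is proved, stated in full; the proofs are below) =====
def Claim_equal_ssl : Prop := ∀ (ip : String), Dom_ssl ip → Spec_ssl ip (ssl ip)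

-- ===== LEMMAS AND PROOFS =====

-- the stream of (is_hypernet, string) additions both programs perform, in order
def emit (h : Bool) (p1 p2 : Option Char) (c : Char) : List (Bool × String) :=
  if p2 = some c ∧ p1 ≠ some c then
    match p1 with
    | some b => [(h, if h then String.mk [b, c, b] else String.mk [c, b, c])]
    | none => []
  else []

def streamAdds : List Char → Bool → Option Char → Option Char → List (Bool × String)
  | [], _, _, _ => []
  | c :: rest, h, p1, p2 =>
    if c = '[' then streamAdds rest true none none
    else if c = ']' then streamAdds rest false none none
    else emit h p1 p2 c ++ streamAdds rest h (some c) p1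

def applyAdds (l : List (Bool × String)) (st : PySem.Set String × PySem.Set String) :
    PySem.Set String × PySem.Set String :=
  l.foldl (fun st hs => if hs.1 then (PySem.Set.add st.1 hs.2, st.2) else (st.1, PySem.Set.add st.2 hs.2)) st

-- last char and second-to-last char of a list, as A's (p1, p2)
def lastTwo (l : List Char) : Option Char × Option Char :=
  match l.reverse with
  | [] => (none, none)
  | [a] => (some a, none)
  | a :: b :: _ => (some a, some b)

def winAdds (h : Bool) (s : List Char) : List (Bool × String) :=
  (win3 s).flatMap (fun t =>
    if t.1 = t.2.2 ∧ t.1 ≠ t.2.1 then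
      [(h, if h then String.mk [t.2.1, t.1, t.2.1] else String.mk [t.1, t.2.1, t.1])]
    else [])

theorem applyAdds_append (l₁ l₂ : List (Bool × String)) (st) :
    applyAdds (l₁ ++ l₂) st = applyAdds l₂ (applyAdds l₁ st) := by
  simp [applyAdds, List.foldl_append]

-- A's loop is applyAdds of its addition stream
theorem sslLoop_eq (l : List Char) : ∀ h p1 p2 ins outs,
    sslLoop l h p1 p2 ins outs = applyAdds (streamAdds l h p1 p2) (ins, outs) := by
  induction l with
  | nil => intro h p1 p2 ins outs; simp [sslLoop, streamAdds, applyAdds]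
  | cons c rest ih =>
    intro h p1 p2 ins outs
    by_cases h1 : c = '['
    · simp [sslLoop, streamAdds, h1, ih]
    · by_cases h2 : c = ']'
      · simp [sslLoop, streamAdds, h1, h2, ih]
      · by_cases h3 : p2 = some c ∧ p1 ≠ some c
        · obtain ⟨h3a, h3b⟩ := h3
          cases hp : p1 with
          | none =>
            simp [sslLoop, streamAdds, h1, h2, h3a, h3b, hp, emit, ih, applyAdds]
          | some b =>
            have hbc : ¬ b = c := by rw [hp] at h3b; simpa using h3b
            cases h <;>
              simp [sslLoop, streamAdds, h1, h2, h3a, h3b, hp, hbc, emit, ih, applyAdds]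
        · simp [sslLoop, streamAdds, h1, h2, h3, emit, ih, applyAdds]

-- B's inner window fold is applyAdds of the segment's window additions
theorem winfold_eq (h : Bool) (w : List (Char × Char × Char)) : ∀ st,
    w.foldl (winStep h) st
      = applyAdds (w.flatMap (fun t =>
          if t.1 = t.2.2 ∧ t.1 ≠ t.2.1 then
            [(h, if h then String.mk [t.2.1, t.1, t.2.1] else String.mk [t.1, t.2.1, t.1])]
          else [])) st := by
  induction w with
  | nil => intro st; simp [applyAdds]
  | cons t w ih =>
    intro st
    obtain ⟨a, b, cc⟩ := t
    by_cases h1 : a = cc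
    · subst h1
      by_cases h2 : a = b
      · subst h2; simp [winStep, ih]
      · cases h <;> simp [winStep, h2, ih, applyAdds]
    · simp [winStep, h1, ih]

-- B's outer fold is applyAdds of the concatenated per-segment additions
theorem segfold_eq (segs : List (List Char × Bool)) : ∀ st,
    segs.foldl (fun st sh => (win3 sh.1).foldl (winStep sh.2) st) st
      = applyAdds (segs.flatMap (fun sh => winAdds sh.2 sh.1)) st := by
  induction segs with
  | nil => intro st; simp [applyAdds]
  | cons sh segs ih =>
    intro st
    rw [List.foldl_cons, ih, List.flatMap_cons, applyAdds_append, winfold_eq, winAdds]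

theorem segLoop_acc (l : List Char) : ∀ cur h segs,
    segLoop l cur h segs = segs ++ segLoop l cur h [] := by
  induction l with
  | nil => intro cur h segs; simp [segLoop]
  | cons c rest ih =>
    intro cur h segs
    by_cases h1 : c = '['
    · rw [segLoop, segLoop]; simp [h1]
      rw [ih _ _ (segs ++ [(cur, h)]), ih _ _ [(cur, h)]]
      simp
    · by_cases h2 : c = ']'
      · rw [segLoop, segLoop]; simp [h1, h2]
        rw [ih _ _ (segs ++ [(cur, h)]), ih _ _ [(cur, h)]]
        simp
      · rw [segLoop, segLoop]; simp [h1, h2]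
        exact ih _ _ segs

theorem lastTwo_cons_of_two_le {l : List Char} (x : Char) (hl : 2 ≤ l.length) :
    lastTwo (x :: l) = lastTwo l := by
  rcases hr : l.reverse with _ | ⟨u, _ | ⟨v, w⟩⟩
  · exfalso; have h := hl; rw [← List.length_reverse, hr] at h; simp at h
  · exfalso; have h := hl; rw [← List.length_reverse, hr] at h; simp at h
  · simp [lastTwo, hr, List.reverse_cons]

theorem lastTwo_snoc (l : List Char) (c : Char) :
    lastTwo (l ++ [c]) = (some c, (lastTwo l).1) := by
  rcases hr : l.reverse with _ | ⟨u, _ | ⟨v, w⟩⟩ <;>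
    simp [lastTwo, List.reverse_append, hr]

theorem win3_snoc (l : List Char) (c : Char) :
    win3 (l ++ [c]) = win3 l ++ (match lastTwo l with
      | (some b, some a) => [(a, b, c)]
      | _ => []) := by
  induction l with
  | nil => simp [win3, lastTwo]
  | cons x t ih =>
    match t with
    | [] => simp [win3, lastTwo]
    | [b] => simp [win3, lastTwo]
    | b :: d :: r =>
      have h2 : 2 ≤ (b :: d :: r).length := by simp
      rw [lastTwo_cons_of_two_le x h2]
      show win3 (x :: b :: d :: (r ++ [c])) = _
      rw [win3]
      rw [show (b :: d :: (r ++ [c])) = (b :: d :: r) ++ [c] by simp]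
      rw [ih, win3]
      simp

theorem winAdds_snoc (h : Bool) (l : List Char) (c : Char) :
    winAdds h (l ++ [c]) = winAdds h l ++ emit h (lastTwo l).1 (lastTwo l).2 c := by
  unfold winAdds
  rw [win3_snoc, List.flatMap_append]
  congr 1
  rcases hlt : lastTwo l with ⟨p1, p2⟩
  match p1, p2 with
  | none, none => simp [emit]
  | none, some a =>
    by_cases hac : a = c <;> simp [emit, hac]
  | some b, none => simp [emit]
  | some b, some a =>
    -- (the (none, some _) shape never arises from lastTwo, but emit is [] there too)
    by_cases hac : a = c
    · subst hac
      by_cases hb : a = b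
      · subst hb; simp [emit]
      · have hb' : ¬ b = a := fun e => hb e.symm
        simp [emit, hb, hb']
    · simp [emit, hac]

-- main correspondence: B's segment decomposition yields exactly A's addition stream
theorem main_adds (l : List Char) : ∀ h cur,
    (segLoop l cur h []).flatMap (fun sh => winAdds sh.2 sh.1)
      = winAdds h cur ++ streamAdds l h (lastTwo cur).1 (lastTwo cur).2 := by
  induction l with
  | nil => intro h cur; simp [segLoop, streamAdds]
  | cons c rest ih =>
    intro h cur
    by_cases h1 : c = '['
    · subst h1
      rw [segLoop, if_pos rfl, segLoop_acc, List.flatMap_append, ih, streamAdds, if_pos rfl]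
      simp [winAdds, win3, lastTwo]
    · by_cases h2 : c = ']'
      · subst h2
        rw [segLoop, if_neg (by decide), if_pos rfl, segLoop_acc, List.flatMap_append, ih,
          streamAdds, if_neg (by decide), if_pos rfl]
        simp [winAdds, win3, lastTwo]
      · rw [segLoop, if_neg h1, if_neg h2, ih, winAdds_snoc, lastTwo_snoc,
          streamAdds, if_neg h1, if_neg h2]
        simp

-- ===== VERDICT (by name: the statement is the Claim_ definition above) =====
theorem ssl_spec : Claim_equal_ssl := by
  intro ip _
  show ssl ip = ssl_alt ip
  simp only [ssl, ssl_alt]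
  rw [segfold_eq, main_adds, sslLoop_eq]
  simp [winAdds, win3, lastTwo]
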